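-- pv_equiv track=rewrite | github.com/jihye525/Algorithm | 프로그래머스/3/70130. 스타 수열/스타 수열.py | solution
-- ===== SOURCE A (Python) =====
-- from collections import Counter
--
-- def solution(a):
--     answer = 0
--     sub_set = Counter(a)
--     cnt = 0
--     left = 0
--     for k in sub_set.keys():
--         if sub_set[k] <= answer:
--             continue
--         idx = 0
--         cnt = 0
--         while idx < len(a)-1:
--             if (a[idx]!= k and a[idx+1]!= k) or a[idx] == a[idx+1]:
--                 idx+=1
--                 continue
--             cnt+=1
--             idx+=2
--         answer= max(answer,cnt)
--
--     return answer*2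
-- ===== SOURCE B (Python) =====
-- from collections import Counter
--
-- def solution(a):
--     # Same candidate loop as A, but the pair count for each candidate k is
--     # computed by a rolling two-variable DP over adjacent pairs instead of
--     # a greedy index-jumping while loop.
--     answer = 0
--     sub_set = Counter(a)
--     for k in sub_set.keys():
--         if sub_set[k] <= answer:
--             continue
--         prev2 = prev1 = 0
--         for x, y in zip(a, a[1:]):
--             pair = 1 if (x == k or y == k) and x != y else 0
--             prev2, prev1 = prev1, max(prev1, prev2 + pair)
--         answer = max(answer, prev1)
--     return answer * 2
-- ===== Notes on version B (the rewrite author's own statement) =====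
-- stated objective: alternative
-- what changed: the greedy index-jumping while loop that counts pairs for each candidate k is replaced by a rolling two-variable dynamic-programming pass over adjacent pairs (maximum matching on a path), proved to yield the same count
import Mathlib
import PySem

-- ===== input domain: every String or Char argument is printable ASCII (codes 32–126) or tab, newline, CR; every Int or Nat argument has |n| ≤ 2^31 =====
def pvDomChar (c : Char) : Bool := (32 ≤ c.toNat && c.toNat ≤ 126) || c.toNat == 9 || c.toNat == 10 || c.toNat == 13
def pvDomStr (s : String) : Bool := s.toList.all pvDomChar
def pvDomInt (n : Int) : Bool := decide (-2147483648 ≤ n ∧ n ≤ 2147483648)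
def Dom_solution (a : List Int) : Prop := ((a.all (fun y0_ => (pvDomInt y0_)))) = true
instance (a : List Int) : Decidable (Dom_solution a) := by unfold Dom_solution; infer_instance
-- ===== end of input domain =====

-- B replaces A's greedy index-jumping inner scan by a rolling two-variable DP
-- over adjacent pairs (alternative algorithm, same cost); proved equal.

-- ===== PORT A =====
-- the while loop: idx jumps by 1 or 2; indices are in range since idx+1 < len a
def solnWhile (a : List Int) (k : Int) (idx cnt : Nat) : Nat :=
  if h : idx + 1 < a.length then
    if (a.getD idx 0 ≠ k ∧ a.getD (idx + 1) 0 ≠ k) ∨ a.getD idx 0 = a.getD (idx + 1) 0 then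
      solnWhile a k (idx + 1) cnt
    else
      solnWhile a k (idx + 2) (cnt + 1)
  else cnt
termination_by a.length - idx

-- sub_set = Counter(a) is inlined as PySem.Dict.counter a
def solution (a : List Int) : Int :=
  ((PySem.Dict.counter a).keys.foldl (fun (answer : Int) k =>
      if (PySem.Dict.counter a).getD k 0 ≤ answer then answer
      else max answer ((solnWhile a k 0 0 : Nat) : Int)) 0) * 2

-- ===== PORT B =====
-- rolling DP: state (prev2, prev1), one step per adjacent pair (x, y)
def dpPairs (a : List Int) (k : Int) : Nat :=
  ((a.zip a.tail).foldl (fun (s : Nat × Nat) p =>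
      (s.2, max s.2 (s.1 + if (p.1 = k ∨ p.2 = k) ∧ p.1 ≠ p.2 then 1 else 0))) (0, 0)).2

def solution_alt (a : List Int) : Int :=
  ((PySem.Dict.counter a).keys.foldl (fun (answer : Int) k =>
      if (PySem.Dict.counter a).getD k 0 ≤ answer then answer
      else max answer ((dpPairs a k : Nat) : Int)) 0) * 2

-- ===== PRECONDITION & SPEC =====
def Spec_solution (a : List Int) (out : Int) : Prop := out = solution_alt a
instance (a : List Int) (out : Int) : Decidable (Spec_solution a out) := by unfold Spec_solution; infer_instance

-- ===== CLAIM (what is proved, stated in full; the proofs are below) =====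
def Claim_equal_solution : Prop := ∀ (a : List Int), Dom_solution a → Spec_solution a (solution a)

-- ===== LEMMAS AND PROOFS =====

-- value of one pair for candidate k
def pv (k x y : Int) : Nat := if (x = k ∨ y = k) ∧ x ≠ y then 1 else 0

-- list-level greedy (A's inner loop, as structural recursion)
def gr (k : Int) : List Int → Nat
  | x :: y :: t => if (x ≠ k ∧ y ≠ k) ∨ x = y then gr k (y :: t) else 1 + gr k t
  | _ => 0
termination_by l => l.length

-- maximum matching on the path (what B's DP computes)
def mm (k : Int) : List Int → Nat
  | x :: y :: t => max (mm k (y :: t)) (pv k x y + mm k t)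
  | _ => 0
termination_by l => l.length

theorem gr_short (k : Int) (l : List Int) (h : l.length ≤ 1) : gr k l = 0 := by
  match l with
  | [] => simp [gr]
  | [x] => simp [gr]
  | x :: y :: t => simp at h

theorem gr_bounds (k : Int) :
    ∀ n (t : List Int), t.length ≤ n →
      ∀ y, gr k t ≤ gr k (y :: t) ∧ gr k (y :: t) ≤ 1 + gr k t := by
  intro n
  induction n with
  | zero =>
    intro t ht y
    have : t = [] := List.eq_nil_of_length_eq_zero (Nat.le_zero.mp ht)
    subst this
    exact ⟨by simp [gr], by simp [gr]⟩
  | succ n ih =>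
    intro t ht y
    match t with
    | [] => exact ⟨by simp [gr], by simp [gr]⟩
    | z :: t' =>
      have ht' : t'.length ≤ n := by simpa using Nat.lt_succ_iff.mp (Nat.lt_of_lt_of_le (by simp) ht)
      constructor
      · show gr k (z :: t') ≤ gr k (y :: z :: t')
        rw [gr]
        split
        · exact Nat.le_refl _
        · exact (ih t' ht' z).2
      · show gr k (y :: z :: t') ≤ 1 + gr k (z :: t')
        rw [gr]
        split
        · omega
        · have := (ih t' ht' z).1
          omega

theorem gr_mono (k : Int) (y : Int) (t : List Int) : gr k t ≤ gr k (y :: t) :=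
  (gr_bounds k t.length t (Nat.le_refl _) y).1

theorem gr_step (k : Int) (y : Int) (t : List Int) : gr k (y :: t) ≤ 1 + gr k t :=
  (gr_bounds k t.length t (Nat.le_refl _) y).2

theorem gr_eq_mm (k : Int) : ∀ n (l : List Int), l.length ≤ n → gr k l = mm k l := by
  intro n
  induction n with
  | zero =>
    intro l hl
    have : l = [] := List.eq_nil_of_length_eq_zero (Nat.le_zero.mp hl)
    subst this; simp [gr, mm]
  | succ n ih =>
    intro l hl
    match l with
    | [] => simp [gr, mm]
    | [x] => simp [gr, mm]
    | x :: y :: t =>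
      have h1 : (y :: t).length ≤ n := by simp at hl ⊢; omega
      have h2 : t.length ≤ n := by simp at hl ⊢; omega
      rw [gr, mm, ← ih _ h1, ← ih _ h2]
      by_cases hc : (x ≠ k ∧ y ≠ k) ∨ x = y
      · have hv : pv k x y = 0 := by
          unfold pv; rw [if_neg]; tauto
        rw [if_pos hc, hv]
        have := gr_mono k y t
        omega
      · have hv : pv k x y = 1 := by
          unfold pv; rw [if_pos]; tauto
        rw [if_neg hc, hv]
        have := gr_step k y t
        omega

theorem mm_mono (k : Int) (y : Int) (t : List Int) : mm k t ≤ mm k (y :: t) := by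
  match t with
  | [] => simp [mm]
  | z :: t' =>
    have h : mm k (y :: z :: t') = max (mm k (z :: t')) (pv k y z + mm k t') := by rw [mm]
    rw [h]; exact Nat.le_max_left _ _

-- the DP fold, from an arbitrary state, computes mm with offsets
theorem dp_fold (k : Int) :
    ∀ (t : List Int) (z : Int) (p2 p1 : Nat), p2 ≤ p1 →
      (List.foldl (fun (s : Nat × Nat) p =>
          (s.2, max s.2 (s.1 + if (p.1 = k ∨ p.2 = k) ∧ p.1 ≠ p.2 then 1 else 0)))
        (p2, p1) ((z :: t).zip t)).2
      = max (p1 + mm k t) (p2 + mm k (z :: t)) := by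
  intro t
  induction t with
  | nil => intro z p2 p1 h; simp [mm]; omega
  | cons x t' ih =>
    intro z p2 p1 h
    have hzip : (z :: x :: t').zip (x :: t') = (z, x) :: ((x :: t').zip t') := by simp
    rw [hzip, List.foldl_cons]
    have := ih x p1 (max p1 (p2 + if (z = k ∨ x = k) ∧ z ≠ x then 1 else 0)) (Nat.le_max_left _ _)
    simp only at this ⊢
    rw [this]
    have hm := mm_mono k x t'
    have hmm : mm k (z :: x :: t') = max (mm k (x :: t')) (pv k z x + mm k t') := by rw [mm]
    rw [hmm]
    unfold pv
    split <;> omega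

theorem dpPairs_eq_mm (a : List Int) (k : Int) : dpPairs a k = mm k a := by
  match a with
  | [] => simp [dpPairs, mm]
  | z :: t =>
    unfold dpPairs
    have : (z :: t).tail = t := rfl
    rw [this, dp_fold k t z 0 0 (Nat.le_refl _)]
    have := mm_mono k z t
    omega

theorem solnWhile_eq (k : Int) :
    ∀ n (a : List Int) (idx cnt : Nat), a.length - idx ≤ n →
      solnWhile a k idx cnt = cnt + gr k (a.drop idx) := by
  intro n
  induction n with
  | zero =>
    intro a idx cnt h
    have hlen : ¬ (idx + 1 < a.length) := by omega
    rw [solnWhile, dif_neg hlen, gr_short]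
    · omega
    · simp; omega
  | succ n ih =>
    intro a idx cnt h
    by_cases hlt : idx + 1 < a.length
    · have hi : idx < a.length := by omega
      have hi1 : idx + 1 < a.length := hlt
      have hd : a.drop idx = a[idx] :: a[idx + 1] :: a.drop (idx + 2) := by
        rw [List.drop_eq_getElem_cons hi, List.drop_eq_getElem_cons hi1]
      have hg0 : a.getD idx 0 = a[idx] := List.getD_eq_getElem a 0 hi
      have hg1 : a.getD (idx + 1) 0 = a[idx + 1] := List.getD_eq_getElem a 0 hi1
      rw [solnWhile, dif_pos hlt, hg0, hg1, hd, gr]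
      split
      · rw [ih a (idx + 1) cnt (by omega)]
        rw [List.drop_eq_getElem_cons hi1]
      · rw [ih a (idx + 2) (cnt + 1) (by omega)]
        omega
    · rw [solnWhile, dif_neg hlt, gr_short]
      · omega
      · simp; omega

theorem inner_eq (a : List Int) (k : Int) : solnWhile a k 0 0 = dpPairs a k := by
  rw [solnWhile_eq k a.length a 0 0 (by omega), dpPairs_eq_mm,
      ← gr_eq_mm k a.length a (Nat.le_refl _)]
  simp

-- ===== VERDICT (by name: the statement is the Claim_ definition above) =====
theorem solution_spec : Claim_equal_solution := by
  intro a _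
  unfold Spec_solution solution solution_alt
  simp only [inner_eq]
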